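-- pv_equiv track=rewrite | github.com/Keralin/WodSniper | app/booking/routes.py | _group_classes_by_time
-- ===== SOURCE A (Python) =====
-- def _group_classes_by_time(classes):
--     """Group classes by time slot, collecting unique class names per slot."""
--     time_slots = {}
--     for cls in classes:
--         time = cls.get('time', '')[:5]  # HH:MM format
--         name = cls.get('name', '')
--
--         if time not in time_slots:
--             time_slots[time] = []
--
--         if name and name not in time_slots[time]:
--             time_slots[time].append(name)
--
--     return time_slots
-- ===== SOURCE B (Python) =====
-- def _group_classes_by_time(classes):
--     """Group classes by time slot, collecting unique class names per slot."""
--     pairs = [(c.get('time', '')[:5], c.get('name', '')) for c in classes]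
--     times = list(dict.fromkeys(t for t, _ in pairs))
--     return {t: list(dict.fromkeys(n for tt, n in pairs if tt == t and n))
--             for t in times}
-- ===== Notes on version B (the rewrite author's own statement) =====
-- stated objective: alternative
-- what changed: B never builds a dict while looping: it materialises (time,name) pairs, dedupes the times order-preservingly, and computes each slot's value as an order-preserving dedupe of a filter over the pairs, replacing A's single mutating fold with in-loop membership guards.
import Mathlib
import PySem

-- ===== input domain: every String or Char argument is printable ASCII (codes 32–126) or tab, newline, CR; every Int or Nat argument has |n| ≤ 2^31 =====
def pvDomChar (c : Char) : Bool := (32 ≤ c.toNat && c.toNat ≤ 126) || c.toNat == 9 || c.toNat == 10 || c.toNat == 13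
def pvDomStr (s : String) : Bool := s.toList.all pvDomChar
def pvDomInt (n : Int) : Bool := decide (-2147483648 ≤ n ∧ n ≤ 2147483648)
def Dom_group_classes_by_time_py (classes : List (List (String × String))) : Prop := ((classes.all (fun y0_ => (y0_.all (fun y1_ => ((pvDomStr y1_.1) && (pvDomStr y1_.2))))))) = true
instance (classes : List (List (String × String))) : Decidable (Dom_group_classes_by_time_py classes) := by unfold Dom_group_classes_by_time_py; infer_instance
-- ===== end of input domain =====

-- B drops A's mutating dict-building fold: it lists (time,name) pairs, dedupes the times,
-- and builds each slot by filtering + deduping the pairs; objective: alternative.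

-- ===== PORT A =====
-- A's loop body (the statements inside 'for cls in classes'), as a named step function
def pvStepA (ts : PySem.Dict String (List String)) (cls : List (String × String)) :
    PySem.Dict String (List String) :=
  let time := PySem.Str.slice (PySem.Dict.getD (PySem.Dict.mk cls) "time" "") none (some 5)
  let name := PySem.Dict.getD (PySem.Dict.mk cls) "name" ""
  let ts1 := if ts.contains time then ts else ts.insert time []
  if name ≠ "" ∧ name ∉ ts1.getD time [] then
    ts1.insert time (ts1.getD time [] ++ [name])
  else ts1

def group_classes_by_time_py (classes : List (List (String × String))) : List (String × List String) :=
  (classes.foldl pvStepA PySem.Dict.empty).items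

-- ===== PORT B =====
-- B's per-class pair (c.get('time','')[:5], c.get('name',''))
def pvPair (c : List (String × String)) : String × String :=
  (PySem.Str.slice (PySem.Dict.getD (PySem.Dict.mk c) "time" "") none (some 5),
   PySem.Dict.getD (PySem.Dict.mk c) "name" "")

def group_classes_by_time_py_alt (classes : List (List (String × String))) : List (String × List String) :=
  let pairs := classes.map pvPair
  let times := PySem.List.dedup (pairs.map Prod.fst)
  times.map (fun t =>
    (t, PySem.List.dedup ((pairs.filter (fun p => p.1 == t && p.2 != "")).map Prod.snd)))

-- ===== PRECONDITION & SPEC =====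
def Spec_group_classes_by_time_py (classes : List (List (String × String))) (out : List (String × List String)) : Prop := out = group_classes_by_time_py_alt classes
instance (classes : List (List (String × String))) (out : List (String × List String)) : Decidable (Spec_group_classes_by_time_py classes out) := by unfold Spec_group_classes_by_time_py; infer_instance

-- ===== CLAIM (what is proved, stated in full; the proofs are below) =====
def Claim_equal_group_classes_by_time_py : Prop := ∀ (classes : List (List (String × String))), Dom_group_classes_by_time_py classes → Spec_group_classes_by_time_py classes (group_classes_by_time_py classes)

-- ===== LEMMAS AND PROOFS =====

-- invariant: A's dict state, after processing the classes whose pair list is `pre`,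
-- has exactly the deduped times as keys and each slot already holds B's deduped name list
def pvInv (ts : PySem.Dict String (List String)) (pre : List (String × String)) : Prop :=
  ts.keys = PySem.List.dedup (pre.map Prod.fst) ∧
  ∀ t, ts.getD t [] =
    PySem.List.dedup ((pre.filter (fun p => p.1 == t && p.2 != "")).map Prod.snd)

theorem pv_dedup_append_singleton (xs : List String) (x : String) :
    PySem.List.dedup (xs ++ [x]) =
      if x ∈ xs then PySem.List.dedup xs else PySem.List.dedup xs ++ [x] := by
  rw [PySem.List.dedup_eq_ofList, PySem.Set.ofList_eq_foldl, List.foldl_append,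
      List.foldl_cons, List.foldl_nil, ← PySem.Set.ofList_eq_foldl]
  by_cases h : x ∈ xs
  · simp [PySem.Set.add, PySem.Set.mem_ofList, h]
  · simp [PySem.Set.add, PySem.Set.mem_ofList, h]

theorem pv_filter_nil_of_not_mem (pre : List (String × String)) (t : String)
    (h : t ∉ pre.map Prod.fst) :
    pre.filter (fun p => p.1 == t && p.2 != "") = [] := by
  rw [List.filter_eq_nil_iff]
  intro p hp
  have : p.1 ≠ t := fun he => h (he ▸ List.mem_map_of_mem hp)
  simp [this]

theorem pvInv_step (ts : PySem.Dict String (List String)) (pre : List (String × String))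
    (t n : String) (h : pvInv ts pre) :
    pvInv
      (let ts1 := if ts.contains t then ts else ts.insert t []
       if n ≠ "" ∧ n ∉ ts1.getD t [] then ts1.insert t (ts1.getD t [] ++ [n]) else ts1)
      (pre ++ [(t, n)]) := by
  obtain ⟨hkeys, hget⟩ := h
  have hmemc : ts.contains t = true ↔ t ∈ pre.map Prod.fst := by
    rw [PySem.Dict.contains_iff_mem_keys, hkeys, PySem.List.mem_dedup]
  -- the times side for ts1
  have hkeys1 : (if ts.contains t then ts else ts.insert t []).keys =
      PySem.List.dedup ((pre ++ [(t, n)]).map Prod.fst) := by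
    simp only [List.map_append, List.map_cons, List.map_nil]
    rw [pv_dedup_append_singleton]
    by_cases hc : ts.contains t = true
    · simp [hc, hmemc.mp hc, hkeys]
    · have hcf : ts.contains t = false := by simpa using hc
      have hnm : t ∉ pre.map Prod.fst := fun hm => hc (hmemc.mpr hm)
      simp [hcf, PySem.Dict.keys_insert_of_not_contains ts _ hcf, hkeys, hnm]
  have hget1 : ∀ t', (if ts.contains t then ts else ts.insert t []).getD t' [] =
      PySem.List.dedup ((pre.filter (fun p => p.1 == t' && p.2 != "")).map Prod.snd) := by
    intro t'
    by_cases hc : ts.contains t = true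
    · simp only [hc, if_true]; exact hget t'
    · have hcf : ts.contains t = false := by simpa using hc
      have hnm : t ∉ pre.map Prod.fst := fun hm => hc (hmemc.mpr hm)
      simp only [hcf, Bool.false_eq_true, if_false, PySem.Dict.getD_insert]
      split
      · rename_i he
        rw [he, pv_filter_nil_of_not_mem pre t hnm]
        simp [PySem.List.dedup]
      · exact hget t'
  set ts1 := if ts.contains t then ts else ts.insert t [] with hts1
  have hct1 : ts1.contains t = true := by
    rw [PySem.Dict.contains_iff_mem_keys, hkeys1, PySem.List.mem_dedup, List.map_append]
    simp
  -- per-slot filtered name lists after appending (t, n)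
  have hfilter : ∀ t', (pre ++ [(t, n)]).filter (fun p => p.1 == t' && p.2 != "") =
      pre.filter (fun p => p.1 == t' && p.2 != "") ++
        (if t = t' ∧ n ≠ "" then [(t, n)] else []) := by
    intro t'
    rw [List.filter_append]
    congr 1
    by_cases he : t = t'
    · by_cases hn : n = ""
      · simp [he, hn]
      · simp [he, hn]
    · simp [he]
  by_cases hn : n = ""
  · subst hn
    simp only [ne_eq, not_true_eq_false, false_and, if_false]
    refine ⟨hkeys1, fun t' => ?_⟩
    rw [hfilter t', if_neg (by simp), List.append_nil, hget1 t']
  · by_cases hmem : n ∈ ts1.getD t []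
    · simp only [ne_eq, hn, not_false_eq_true, true_and, hmem, not_true_eq_false, if_false]
      refine ⟨hkeys1, fun t' => ?_⟩
      rw [hfilter t', hget1 t']
      by_cases he : t = t'
      · subst he
        rw [if_pos ⟨rfl, hn⟩]
        have hmemN : n ∈ (pre.filter (fun p => p.1 == t && p.2 != "")).map Prod.snd := by
          have := hget1 t; rw [this] at hmem
          exact (PySem.List.mem_dedup _ _).mp hmem
        rw [List.map_append, List.map_cons, List.map_nil,
            pv_dedup_append_singleton, if_pos hmemN]
      · rw [if_neg (fun hc => he hc.1), List.append_nil]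
    · simp only [ne_eq, hn, not_false_eq_true, true_and, hmem, if_true]
      refine ⟨?_, fun t' => ?_⟩
      · rw [PySem.Dict.keys_insert_of_contains ts1 _ hct1]; exact hkeys1
      · rw [PySem.Dict.getD_insert, hfilter t']
        by_cases he : t' = t
        · subst he
          rw [if_pos rfl, if_pos ⟨rfl, hn⟩, hget1 t', List.map_append, List.map_cons, List.map_nil]
          have hmemN : n ∉ (pre.filter (fun p => p.1 == t' && p.2 != "")).map Prod.snd := by
            intro hx
            exact hmem (by rw [hget1 t']; exact (PySem.List.mem_dedup _ _).mpr hx)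
          rw [pv_dedup_append_singleton, if_neg hmemN]
        · rw [if_neg he, if_neg (fun hc => he hc.1.symm), List.append_nil, hget1 t']

theorem pvInv_fold (rest : List (List (String × String)))
    (ts : PySem.Dict String (List String)) (pre : List (String × String))
    (h : pvInv ts pre) :
    pvInv (rest.foldl pvStepA ts) (pre ++ rest.map pvPair) := by
  induction rest generalizing ts pre with
  | nil => simpa using h
  | cons c r ih =>
    have step : pvInv (pvStepA ts c) (pre ++ [pvPair c]) :=
      pvInv_step ts pre (pvPair c).1 (pvPair c).2 h
    have := ih (pvStepA ts c) (pre ++ [pvPair c]) step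
    simpa [List.append_assoc] using this

-- ===== VERDICT (by name: the statement is the Claim_ definition above) =====
theorem group_classes_by_time_py_spec : Claim_equal_group_classes_by_time_py := by
  intro classes _
  unfold Spec_group_classes_by_time_py group_classes_by_time_py group_classes_by_time_py_alt
  have h := pvInv_fold classes PySem.Dict.empty []
    ⟨by simp [PySem.Dict.keys_empty, PySem.List.dedup],
     fun t => by simp [PySem.Dict.getD_empty, PySem.List.dedup]⟩
  rw [List.nil_append] at h
  obtain ⟨hkeys, hget⟩ := h
  have hnd : (classes.foldl pvStepA PySem.Dict.empty).keys.Nodup := by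
    rw [hkeys]; exact PySem.List.nodup_dedup _
  show (classes.foldl pvStepA PySem.Dict.empty).items =
    (PySem.List.dedup ((classes.map pvPair).map Prod.fst)).map (fun t =>
      (t, PySem.List.dedup (((classes.map pvPair).filter
        (fun p => p.1 == t && p.2 != "")).map Prod.snd)))
  rw [PySem.Dict.items_eq_map_keys _ hnd ([] : List String), hkeys]
  exact List.map_congr_left fun t _ => by rw [hget t]
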